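-- pv_equiv track=rewrite | github.com/halfdoctor/py-clob-client | odds.py | format_team_name
-- ===== SOURCE A (Python) =====
-- def format_team_name(team_name):
--     """Formats team name to handle different naming conventions across betting sites"""
--     # Dictionary of common IPL team name variations
--     team_variations = {
--         "Mumbai Indians": ["MI", "Mumbai", "Mumbai I"],
--         "Chennai Super Kings": ["CSK", "Chennai", "Chennai SK"],
--         "Royal Challengers Bangalore": ["RCB", "Bangalore", "Royal Challengers"],
--         "Kolkata Knight Riders": ["KKR", "Kolkata", "Knight Riders"],
--         "Delhi Capitals": ["DC", "Delhi", "Capitals"],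
--         "Sunrisers Hyderabad": ["SRH", "Hyderabad", "Sunrisers"],
--         "Punjab Kings": ["PBKS", "Punjab", "Kings XI Punjab"],
--         "Rajasthan Royals": ["RR", "Rajasthan", "Royals"],
--         "Lucknow Super Giants": ["LSG", "Lucknow", "Super Giants"],
--         "Gujarat Titans": ["GT", "Gujarat", "Titans"]
--     }
--
--     # Return the standardized team name or the original if not found
--     for full_name, variations in team_variations.items():
--         if team_name in variations or team_name == full_name:
--             return full_name
--     return team_name
-- ===== SOURCE B (Python) =====
-- # Compact alias table parsed once into a flat reverse-lookup dict; the
-- # function body is then a single dict .get with the input as its default.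
-- _TABLE = ("MI|Mumbai|Mumbai I>Mumbai Indians;"
--           "CSK|Chennai|Chennai SK>Chennai Super Kings;"
--           "RCB|Bangalore|Royal Challengers>Royal Challengers Bangalore;"
--           "KKR|Kolkata|Knight Riders>Kolkata Knight Riders;"
--           "DC|Delhi|Capitals>Delhi Capitals;"
--           "SRH|Hyderabad|Sunrisers>Sunrisers Hyderabad;"
--           "PBKS|Punjab|Kings XI Punjab>Punjab Kings;"
--           "RR|Rajasthan|Royals>Rajasthan Royals;"
--           "LSG|Lucknow|Super Giants>Lucknow Super Giants;"
--           "GT|Gujarat|Titans>Gujarat Titans")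
--
-- _REVERSE = {}
-- for _entry in _TABLE.split(";"):
--     _aliases, _full = _entry.split(">")
--     for _a in _aliases.split("|"):
--         _REVERSE[_a] = _full
--     _REVERSE[_full] = _full
--
-- def format_team_name(team_name):
--     """Formats team name to handle different naming conventions across betting sites"""
--     return _REVERSE.get(team_name, team_name)
-- ===== Notes on version B (the rewrite author's own statement) =====
-- stated objective: idiomatic
-- what changed: Replace the per-call scan over the variation lists with a flat reverse-lookup dict built once by parsing a compact alias table string (each alias and each full name mapped to the canonical name), so the call body is a single dict .get with the input as default.
import Mathlib
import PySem

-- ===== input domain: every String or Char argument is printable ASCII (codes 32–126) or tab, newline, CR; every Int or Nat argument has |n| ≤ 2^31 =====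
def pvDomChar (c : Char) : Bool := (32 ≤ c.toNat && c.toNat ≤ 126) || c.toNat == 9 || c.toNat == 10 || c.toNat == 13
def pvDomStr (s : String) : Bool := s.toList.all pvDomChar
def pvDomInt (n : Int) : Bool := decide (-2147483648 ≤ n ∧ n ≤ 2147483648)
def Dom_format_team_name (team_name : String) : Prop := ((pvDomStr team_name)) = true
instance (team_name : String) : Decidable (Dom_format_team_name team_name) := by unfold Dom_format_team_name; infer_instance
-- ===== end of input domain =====

-- B replaces A's per-call scan over the variation lists with a flat reverse-lookup dict,
-- built once by parsing a compact alias-table string (idiomatic; same result).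

-- ===== PORT A =====
-- the dict literal of A, as an insertion-ordered association list
def pvTeamVariations : List (String × List String) :=
  [ ("Mumbai Indians", ["MI", "Mumbai", "Mumbai I"]),
    ("Chennai Super Kings", ["CSK", "Chennai", "Chennai SK"]),
    ("Royal Challengers Bangalore", ["RCB", "Bangalore", "Royal Challengers"]),
    ("Kolkata Knight Riders", ["KKR", "Kolkata", "Knight Riders"]),
    ("Delhi Capitals", ["DC", "Delhi", "Capitals"]),
    ("Sunrisers Hyderabad", ["SRH", "Hyderabad", "Sunrisers"]),
    ("Punjab Kings", ["PBKS", "Punjab", "Kings XI Punjab"]),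
    ("Rajasthan Royals", ["RR", "Rajasthan", "Royals"]),
    ("Lucknow Super Giants", ["LSG", "Lucknow", "Super Giants"]),
    ("Gujarat Titans", ["GT", "Gujarat", "Titans"]) ]

-- the for-loop with early return: first (full_name, variations) entry that matches
def pvScan (team_name : String) : List (String × List String) → String
  | [] => team_name
  | (full_name, variations) :: rest =>
      if variations.contains team_name || team_name == full_name then full_name
      else pvScan team_name rest

def format_team_name (team_name : String) : String :=
  pvScan team_name pvTeamVariations

-- ===== PORT B =====
-- Source B's compact alias table: "alias|alias|alias>Full Name;..."
def pvTable : String :=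
  "MI|Mumbai|Mumbai I>Mumbai Indians;CSK|Chennai|Chennai SK>Chennai Super Kings;RCB|Bangalore|Royal Challengers>Royal Challengers Bangalore;KKR|Kolkata|Knight Riders>Kolkata Knight Riders;DC|Delhi|Capitals>Delhi Capitals;SRH|Hyderabad|Sunrisers>Sunrisers Hyderabad;PBKS|Punjab|Kings XI Punjab>Punjab Kings;RR|Rajasthan|Royals>Rajasthan Royals;LSG|Lucknow|Super Giants>Lucknow Super Giants;GT|Gujarat|Titans>Gujarat Titans"

-- module-level build pass of Source B: parse each ";"-entry, unpack on ">",
-- insert every "|"-alias and the full name itself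
-- split? is exact for the nonempty literal separators used here (none only for sep = "")
def pvSplit (s sep : String) : List String := (PySem.Str.split? s sep).getD []

def pvReverse : PySem.Dict String String :=
  (pvSplit pvTable ";").foldl
    (fun d entry =>
      match pvSplit entry ">" with
      | [aliases, full] =>
          ((pvSplit aliases "|").foldl (fun d' a => d'.insert a full) d).insert full full
      | _ => d)   -- Python's tuple unpack would raise here; never reached for pvTable
    PySem.Dict.empty

def format_team_name_alt (team_name : String) : String :=
  pvReverse.getD team_name team_name

-- ===== PRECONDITION & SPEC =====
def Spec_format_team_name (team_name : String) (out : String) : Prop := out = format_team_name_alt team_name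
instance (team_name : String) (out : String) : Decidable (Spec_format_team_name team_name out) := by unfold Spec_format_team_name; infer_instance

-- ===== CLAIM (what is proved, stated in full; the proofs are below) =====
def Claim_equal_format_team_name : Prop := ∀ (team_name : String), Dom_format_team_name team_name → Spec_format_team_name team_name (format_team_name team_name)

-- ===== LEMMAS AND PROOFS =====

-- pvReverse evaluates to this flat association list (kernel computation)
set_option maxRecDepth 40000 in
set_option maxHeartbeats 4000000 in
theorem pvReverse_eq : pvReverse = PySem.Dict.mk [("MI", "Mumbai Indians"), ("Mumbai", "Mumbai Indians"), ("Mumbai I", "Mumbai Indians"), ("Mumbai Indians", "Mumbai Indians"), ("CSK", "Chennai Super Kings"), ("Chennai", "Chennai Super Kings"), ("Chennai SK", "Chennai Super Kings"), ("Chennai Super Kings", "Chennai Super Kings"), ("RCB", "Royal Challengers Bangalore"), ("Bangalore", "Royal Challengers Bangalore"), ("Royal Challengers", "Royal Challengers Bangalore"), ("Royal Challengers Bangalore", "Royal Challengers Bangalore"), ("KKR", "Kolkata Knight Riders"), ("Kolkata", "Kolkata Knight Riders"), ("Knight Riders", "Kolkata Knight Riders"), ("Kolkata Knight Riders", "Kolkata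 Knight Riders"), ("DC", "Delhi Capitals"), ("Delhi", "Delhi Capitals"), ("Capitals", "Delhi Capitals"), ("Delhi Capitals", "Delhi Capitals"), ("SRH", "Sunrisers Hyderabad"), ("Hyderabad", "Sunrisers Hyderabad"), ("Sunrisers", "Sunrisers Hyderabad"), ("Sunrisers Hyderabad", "Sunrisers Hyderabad"), ("PBKS", "Punjab Kings"), ("Punjab", "Punjab Kings"), ("Kings XI Punjab", "Punjab Kings"), ("Punjab Kings", "Punjab Kings"), ("RR", "Rajasthan Royals"), ("Rajasthan", "Rajasthan Royals"), ("Royals", "Rajasthan Royals"), ("Rajasthan Royals", "Rajasthan Royals"), ("LSG", "Lucknow Super Giants"), ("Lucknow", "Lucknow Super Giants"), ("Super Giants", "Lucknow Super Giants"), ("Lucknow Super Giants", "Lucknow Super Giants"), ("GT", "Gujarat Titans"), ("Gujarat", "Gujarat Titans"), ("Titans", "Gujarat Titans"), ("Gujarat Titans", "Gujarat Titans")] := by decide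

-- ===== VERDICT (by name: the statement is the Claim_ definition above) =====
set_option maxRecDepth 40000 in
set_option maxHeartbeats 4000000 in
theorem format_team_name_spec : Claim_equal_format_team_name := by
  intro t _
  unfold Spec_format_team_name
  by_cases h : t ∈ ["MI", "Mumbai", "Mumbai I", "Mumbai Indians", "CSK", "Chennai", "Chennai SK", "Chennai Super Kings", "RCB", "Bangalore", "Royal Challengers", "Royal Challengers Bangalore", "KKR", "Kolkata", "Knight Riders", "Kolkata Knight Riders", "DC", "Delhi", "Capitals", "Delhi Capitals", "SRH", "Hyderabad", "Sunrisers", "Sunrisers Hyderabad", "PBKS", "Punjab", "Kings XI Punjab", "Punjab Kings", "RR", "Rajasthan", "Royals", "Rajasthan Royals", "LSG", "Lucknow", "Super Giants", "Lucknow Super Giants", "GT", "Gujarat", "Titans", "Gujarat Titans"]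
  · simp only [List.mem_cons, List.not_mem_nil, or_false] at h
    rcases h with rfl|rfl|rfl|rfl|rfl|rfl|rfl|rfl|rfl|rfl|rfl|rfl|rfl|rfl|rfl|rfl|rfl|rfl|rfl|rfl|rfl|rfl|rfl|rfl|rfl|rfl|rfl|rfl|rfl|rfl|rfl|rfl|rfl|rfl|rfl|rfl|rfl|rfl|rfl|rfl <;> decide
  · simp only [List.mem_cons, List.not_mem_nil, or_false] at h
    push Not at h
    obtain ⟨h1, h2, h3, h4, h5, h6, h7, h8, h9, h10, h11, h12, h13, h14, h15, h16, h17, h18, h19, h20, h21, h22, h23, h24, h25, h26, h27, h28, h29, h30, h31, h32, h33, h34, h35, h36, h37, h38, h39, h40⟩ := h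
    have h1' := Ne.symm h1
    have h2' := Ne.symm h2
    have h3' := Ne.symm h3
    have h4' := Ne.symm h4
    have h5' := Ne.symm h5
    have h6' := Ne.symm h6
    have h7' := Ne.symm h7
    have h8' := Ne.symm h8
    have h9' := Ne.symm h9
    have h10' := Ne.symm h10
    have h11' := Ne.symm h11
    have h12' := Ne.symm h12
    have h13' := Ne.symm h13
    have h14' := Ne.symm h14
    have h15' := Ne.symm h15
    have h16' := Ne.symm h16
    have h17' := Ne.symm h17
    have h18' := Ne.symm h18
    have h19' := Ne.symm h19
    have h20' := Ne.symm h20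
    have h21' := Ne.symm h21
    have h22' := Ne.symm h22
    have h23' := Ne.symm h23
    have h24' := Ne.symm h24
    have h25' := Ne.symm h25
    have h26' := Ne.symm h26
    have h27' := Ne.symm h27
    have h28' := Ne.symm h28
    have h29' := Ne.symm h29
    have h30' := Ne.symm h30
    have h31' := Ne.symm h31
    have h32' := Ne.symm h32
    have h33' := Ne.symm h33
    have h34' := Ne.symm h34
    have h35' := Ne.symm h35
    have h36' := Ne.symm h36
    have h37' := Ne.symm h37
    have h38' := Ne.symm h38
    have h39' := Ne.symm h39
    have h40' := Ne.symm h40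
    unfold format_team_name format_team_name_alt
    rw [pvReverse_eq]
    simp only [pvTeamVariations, pvScan, List.contains_cons, List.contains_nil,
      PySem.Dict.getD, PySem.Dict.get?_mk_cons, beq_iff_eq]
    simp only [PySem.Dict.get?, List.find?_nil, Option.map_none]
    simp [h1, h1', h2, h2', h3, h3', h4, h4', h5, h5', h6, h6', h7, h7', h8, h8', h9, h9', h10, h10', h11, h11', h12, h12', h13, h13', h14, h14', h15, h15', h16, h16', h17, h17', h18, h18', h19, h19', h20, h20', h21, h21', h22, h22', h23, h23', h24, h24', h25, h25', h26, h26', h27, h27', h28, h28', h29, h29', h30, h30', h31, h31', h32, h32', h33, h33', h34, h34', h35, h35', h36, h36', h37, h37', h38, h38', h39, h39', h40, h40']
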